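-- pv_equiv track=rewrite | github.com/Ankit-1204/sktime | sktime/annotation/wclust.py | overlap_final_label
-- ===== SOURCE A (Python) =====
-- def overlap_final_label(labels, window_size, step_size, X):
--     time_point_labels = [[] for _ in range(len(X))]
--
--     for i in range(len(labels)):
--         start_ind = i * step_size
--         end_ind = start_ind + window_size
--         if end_ind > len(X):
--             end_ind = len(X)
--         for j in range(start_ind, end_ind):
--             time_point_labels[j].append(int(labels[i]))
--     return time_point_labels
-- ===== SOURCE B (Python) =====
-- def overlap_final_label(labels, window_size, step_size, X):
--     m = len(labels)
--     result = []
--     for j in range(len(X)):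
--         if step_size == 0:
--             ids = range(m) if j < window_size else range(0)
--         else:
--             lo = max(0, -((window_size - 1 - j) // step_size))
--             hi = min(m - 1, j // step_size)
--             ids = range(lo, hi + 1)
--         result.append([int(labels[i]) for i in ids])
--     return result
-- ===== Notes on version B (the rewrite author's own statement) =====
-- stated objective: alternative
-- what changed: B inverts A's window-centric scatter into a point-centric gather: for each time point it computes the contiguous interval of covering window indices by floor/ceil division (with an explicit step_size==0 case) instead of appending into a preallocated table while sweeping windows.
-- outside the precondition, e.g. on overlap_final_label([1, 2], 1, -1, [7, 8]): A returns [[1], [2]], B returns [[1], []]; on overlap_final_label([1, 2, 3, 4], 1, -1, [7, 8]): A raises IndexError, B returns [[1], []]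
import Mathlib
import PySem

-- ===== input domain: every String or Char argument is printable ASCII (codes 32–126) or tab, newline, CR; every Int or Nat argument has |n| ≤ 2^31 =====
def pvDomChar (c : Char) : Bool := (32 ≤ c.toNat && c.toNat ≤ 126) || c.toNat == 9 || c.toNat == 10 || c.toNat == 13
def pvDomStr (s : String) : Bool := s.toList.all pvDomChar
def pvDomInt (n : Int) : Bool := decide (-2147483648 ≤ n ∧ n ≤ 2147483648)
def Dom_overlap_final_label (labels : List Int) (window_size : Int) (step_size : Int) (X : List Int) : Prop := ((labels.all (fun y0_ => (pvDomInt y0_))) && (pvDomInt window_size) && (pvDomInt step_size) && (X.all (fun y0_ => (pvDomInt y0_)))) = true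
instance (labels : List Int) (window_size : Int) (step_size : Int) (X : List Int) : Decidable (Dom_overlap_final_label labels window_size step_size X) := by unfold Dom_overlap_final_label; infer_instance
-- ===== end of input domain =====

-- B re-derives each point's label list by a gather (point-centric index arithmetic) instead of
-- A's scatter over windows; equivalence of the RETURN values is proved for step_size ≥ 0.

-- ===== PORT A =====
-- Python `tpl[j].append(v)`: a negative j wraps around; an out-of-range j raises IndexError
-- (such inputs are excluded by Pre_), modelled here as a no-op.
def pyAppendAt (tpl : List (List Int)) (j : Int) (v : Int) : List (List Int) :=
  let jw : Int := if j < 0 then j + tpl.length else j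
  if 0 ≤ jw ∧ jw < (tpl.length : Int) then tpl.set jw.toNat (tpl.getD jw.toNat [] ++ [v]) else tpl

-- body of A's outer loop (one window i scattered over its covered points)
def aWindowStep (labels : List Int) (window_size : Int) (step_size : Int) (n : Nat)
    (tpl : List (List Int)) (i : Nat) : List (List Int) :=
  let start_ind : Int := (i : Int) * step_size
  let end_ind0 : Int := start_ind + window_size
  let end_ind : Int := if end_ind0 > (n : Int) then (n : Int) else end_ind0
  (PySem.List.pyRange start_ind end_ind 1).foldl
    (fun t j => pyAppendAt t j (labels.getD i 0)) tpl

def overlap_final_label (labels : List Int) (window_size : Int) (step_size : Int) (X : List Int) : List (List Int) :=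
  (List.range labels.length).foldl (aWindowStep labels window_size step_size X.length)
    ((List.range X.length).map (fun _ => []))

-- ===== PORT B =====
-- labels gathered for one time point j
def bPoint (labels : List Int) (window_size : Int) (step_size : Int) (j : Nat) : List Int :=
  if step_size == 0 then
    if (j : Int) < window_size then (List.range labels.length).map (fun (i : Nat) => labels.getD i 0) else []
  else
    let lo : Int := max 0 (-(PySem.Int.floordiv (window_size - 1 - (j : Int)) step_size))
    let hi : Int := min ((labels.length : Int) - 1) (PySem.Int.floordiv (j : Int) step_size)
    (PySem.List.pyRange lo (hi + 1) 1).map (fun (i : Int) => labels.getD i.toNat 0)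

def overlap_final_label_alt (labels : List Int) (window_size : Int) (step_size : Int) (X : List Int) : List (List Int) :=
  (List.range X.length).map (bPoint labels window_size step_size)

-- ===== PRECONDITION & SPEC =====
-- Pre_ excludes negative step_size, outside the natural domain of a sliding-window stride:
-- there A's window start indices go negative and Python's negative indexing silently wraps
-- appends onto the tail of the output (or raises IndexError once j < -len(X)).
def Pre_overlap_final_label (labels : List Int) (window_size : Int) (step_size : Int) (X : List Int) : Prop :=
  0 ≤ step_size
instance (labels : List Int) (window_size : Int) (step_size : Int) (X : List Int) : Decidable (Pre_overlap_final_label labels window_size step_size X) := by unfold Pre_overlap_final_label; infer_instance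

def pvWitness_overlap_final_label : List Int × Int × Int × List Int := ([1, 2], 3, 2, [5, 6, 7, 8])

def Spec_overlap_final_label (labels : List Int) (window_size : Int) (step_size : Int) (X : List Int) (out : List (List Int)) : Prop := out = overlap_final_label_alt labels window_size step_size X
instance (labels : List Int) (window_size : Int) (step_size : Int) (X : List Int) (out : List (List Int)) : Decidable (Spec_overlap_final_label labels window_size step_size X out) := by unfold Spec_overlap_final_label; infer_instance

-- ===== CLAIM (what is proved, stated in full; the proofs are below) =====
def Claim_equal_overlap_final_label : Prop := ∀ (labels : List Int) (window_size : Int) (step_size : Int) (X : List Int), Dom_overlap_final_label labels window_size step_size X → Pre_overlap_final_label labels window_size step_size X → Spec_overlap_final_label labels window_size step_size X (overlap_final_label labels window_size step_size X)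

-- ===== LEMMAS AND PROOFS =====

-- the label list that point j carries after the first k windows have been scattered
def Gpt (labels : List Int) (w s : Int) (k : Nat) (j : Nat) : List Int :=
  (List.range k).filterMap (fun (i : Nat) =>
    if (i : Int) * s ≤ (j : Int) ∧ (j : Int) < (i : Int) * s + w then some (labels.getD i 0) else none)

theorem set_range_map {α : Type} (n : Nat) (f : Nat → α) (k : Nat) (v : α) (hk : k < n) :
    ((List.range n).map f).set k v = (List.range n).map (fun j => if j = k then v else f j) := by
  apply List.ext_getElem
  · simp only [List.length_set, List.length_map, List.length_range]
  · intro i h1 h2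
    simp only [List.getElem_set, List.getElem_map, List.getElem_range]
    by_cases h : k = i
    · rw [if_pos h, if_pos h.symm]
    · rw [if_neg h, if_neg (fun hh => h hh.symm)]

theorem getD_range_map (n : Nat) (f : Nat → List Int) (k : Nat) (hk : k < n) :
    ((List.range n).map f).getD k [] = f k := by
  simp [List.getD, List.getElem?_map, List.getElem?_range, hk]

theorem inner_loop (n : Nat) (v : Int) :
    ∀ (c : Nat) (a b : Int) (f : Nat → List Int), 0 ≤ a → b ≤ (n : Int) → (b - a).toNat = c →
    (PySem.List.pyRange a b 1).foldl (fun t j => pyAppendAt t j v) ((List.range n).map f)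
      = (List.range n).map (fun (j : Nat) => if a ≤ (j : Int) ∧ (j : Int) < b then f j ++ [v] else f j) := by
  intro c
  induction c with
  | zero =>
    intro a b f ha hb hc
    rw [PySem.List.pyRange_one_eq_nil (by omega)]
    simp only [List.foldl_nil]
    apply List.map_congr_left
    intro j hj
    rw [if_neg (by omega)]
  | succ c ih =>
    intro a b f ha hb hc
    have hab : a < b := by omega
    rw [PySem.List.pyRange_one_cons hab]
    simp only [List.foldl_cons]
    have han : a < (n : Int) := by omega
    have hstep : pyAppendAt ((List.range n).map f) a v
        = (List.range n).map (fun (j : Nat) => if j = a.toNat then f j ++ [v] else f j) := by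
      unfold pyAppendAt
      simp only [List.length_map, List.length_range]
      rw [if_neg (show ¬ a < 0 by omega)]
      rw [if_pos (show 0 ≤ a ∧ a < (n : Int) by exact ⟨ha, han⟩)]
      rw [getD_range_map n f a.toNat (by omega), set_range_map n f a.toNat _ (by omega)]
      apply List.map_congr_left
      intro j _
      split_ifs with h
      · rw [h]
      · rfl
    rw [hstep, ih (a + 1) b _ (by omega) hb (by omega)]
    apply List.map_congr_left
    intro j hj
    simp only [List.mem_range] at hj
    have hja : j = a.toNat ↔ (j : Int) = a := by omega
    split_ifs with h1 h2 h3 h3 h4 <;> first | rfl | omega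

theorem outer_loop (labels : List Int) (w s : Int) (n : Nat) (hs : 0 ≤ s) (k : Nat) :
    (List.range k).foldl (aWindowStep labels w s n) ((List.range n).map (fun _ => []))
      = (List.range n).map (fun j => Gpt labels w s k j) := by
  induction k with
  | zero => simp [Gpt]
  | succ k ih =>
    rw [List.range_succ, List.foldl_append, List.foldl_cons, List.foldl_nil, ih]
    unfold aWindowStep
    set start : Int := (k : Int) * s with hstart
    set e0 : Int := start + w with he0
    set e : Int := if e0 > (n : Int) then (n : Int) else e0 with he
    have hs0 : 0 ≤ start := by positivity
    have hen : e ≤ (n : Int) := by rw [he]; split_ifs <;> omega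
    rw [inner_loop n (labels.getD k 0) (e - start).toNat start e _ hs0 hen rfl]
    apply List.map_congr_left
    intro j hj
    simp only [List.mem_range] at hj
    have hGpt : Gpt labels w s (k + 1) j
        = Gpt labels w s k j ++ (if (k : Int) * s ≤ (j : Int) ∧ (j : Int) < (k : Int) * s + w
            then [labels.getD k 0] else []) := by
      unfold Gpt
      rw [List.range_succ, List.filterMap_append]
      simp only [List.filterMap_cons, List.filterMap_nil]
      split_ifs <;> simp
    rw [hGpt]
    have hcond : (start ≤ (j : Int) ∧ (j : Int) < e) ↔
        ((k : Int) * s ≤ (j : Int) ∧ (j : Int) < (k : Int) * s + w) := by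
      rw [he, he0, hstart]; split_ifs <;> omega
    by_cases hc2 : (k : Int) * s ≤ (j : Int) ∧ (j : Int) < (k : Int) * s + w
    · rw [if_pos (hcond.mpr hc2), if_pos hc2]
    · rw [if_neg (fun h => hc2 (hcond.mp h)), if_neg hc2, List.append_nil]

theorem filterMap_range_interval {α : Type} (g : Nat → α) (lo : Int) (h0 : 0 ≤ lo) :
    ∀ (m : Nat) (hi : Int), hi < (m : Int) →
    (List.range m).filterMap (fun (i : Nat) => if lo ≤ (i : Int) ∧ (i : Int) ≤ hi then some (g i) else none)
      = (PySem.List.pyRange lo (hi + 1) 1).map (fun (i : Int) => g i.toNat) := by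
  intro m
  induction m with
  | zero =>
    intro hi hm
    rw [PySem.List.pyRange_one_eq_nil (by omega)]
    simp
  | succ m ih =>
    intro hi hm
    rw [List.range_succ, List.filterMap_append]
    by_cases hcase : hi < (m : Int)
    · rw [ih hi hcase]
      simp only [List.filterMap_cons, List.filterMap_nil]
      rw [if_neg (by omega)]
      simp
    · have hhi : hi = (m : Int) := by omega
      by_cases hlo : lo ≤ (m : Int)
      · have h1 : (List.range m).filterMap
            (fun (i : Nat) => if lo ≤ (i : Int) ∧ (i : Int) ≤ hi then some (g i) else none)
            = (List.range m).filterMap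
            (fun (i : Nat) => if lo ≤ (i : Int) ∧ (i : Int) ≤ (m : Int) - 1 then some (g i) else none) := by
          apply List.filterMap_congr
          intro i hi2
          simp only [List.mem_range] at hi2
          split_ifs <;> first | rfl | omega
        rw [h1, ih ((m : Int) - 1) (by omega)]
        have h2 : (m : Int) - 1 + 1 = (m : Int) := by ring
        rw [h2, hhi, PySem.List.pyRange_one_succ_right hlo]
        simp only [List.filterMap_cons, List.filterMap_nil]
        rw [if_pos (by constructor <;> omega)]
        simp
      · have hnil : PySem.List.pyRange lo (hi + 1) 1 = [] :=
          PySem.List.pyRange_one_eq_nil (by omega)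
        rw [hnil]
        have h1 : (List.range m).filterMap
            (fun (i : Nat) => if lo ≤ (i : Int) ∧ (i : Int) ≤ hi then some (g i) else none) = [] := by
          simp only [List.filterMap_eq_nil_iff]
          intro i hi2
          rw [if_neg (by simp only [List.mem_range] at hi2; omega)]
        simp only [List.filterMap_cons, List.filterMap_nil]
        rw [h1, if_neg (by omega)]
        simp
  
theorem bPoint_eq (labels : List Int) (w s : Int) (hs : 0 ≤ s) (j : Nat) :
    bPoint labels w s j = Gpt labels w s labels.length j := by
  unfold bPoint Gpt
  by_cases h0 : s = 0
  · subst h0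
    simp only [beq_self_eq_true, if_pos]
    by_cases hjw : (j : Int) < w
    · rw [if_pos hjw]
      have : ∀ i ∈ List.range labels.length,
          (if (i : Int) * 0 ≤ (j : Int) ∧ (j : Int) < (i : Int) * 0 + w
            then some (labels.getD i 0) else none) = some (labels.getD i 0) := by
        intro i _
        rw [if_pos (by constructor <;> omega)]
      rw [List.filterMap_congr this]
      simp [List.filterMap_eq_map]
    · rw [if_neg hjw]
      symm
      simp only [List.filterMap_eq_nil_iff]
      intro i _
      rw [if_neg (by omega)]
  · have hpos : 0 < s := by omega
    rw [if_neg (by simpa using h0)]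
    have hcond : ∀ i ∈ List.range labels.length,
        (if (i : Int) * s ≤ (j : Int) ∧ (j : Int) < (i : Int) * s + w
          then some (labels.getD i 0) else none)
        = (if max 0 (-(PySem.Int.floordiv (w - 1 - (j : Int)) s)) ≤ (i : Int) ∧
              (i : Int) ≤ min ((labels.length : Int) - 1) (PySem.Int.floordiv (j : Int) s)
            then some (labels.getD i 0) else none) := by
      intro i hi2
      simp only [List.mem_range] at hi2
      have hA : (i : Int) ≤ PySem.Int.floordiv (j : Int) s ↔ (i : Int) * s ≤ (j : Int) :=
        PySem.Int.le_floordiv_iff_mul_le hpos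
      have hB : -(i : Int) ≤ PySem.Int.floordiv (w - 1 - (j : Int)) s ↔
          -(i : Int) * s ≤ w - 1 - (j : Int) := PySem.Int.le_floordiv_iff_mul_le hpos
      rw [neg_mul] at hB
      have him : (i : Int) ≤ (labels.length : Int) - 1 := by omega
      have hinn : (0 : Int) ≤ (i : Int) := by positivity
      split_ifs with hL hR hR
      · rfl
      · exfalso; apply hR
        constructor
        · simp only [max_le_iff]
          constructor
          · exact hinn
          · omega
        · simp only [le_min_iff]
          exact ⟨him, hA.mpr hL.1⟩
      · exfalso; apply hL
        simp only [max_le_iff, le_min_iff] at hR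
        constructor
        · exact (PySem.Int.le_floordiv_iff_mul_le hpos).mp hR.2.2
        · have := hB.mp (by omega)
          omega
      · rfl
    rw [List.filterMap_congr hcond]
    exact Eq.symm (filterMap_range_interval (fun i => labels.getD i 0)
      (max 0 (-(PySem.Int.floordiv (w - 1 - (j : Int)) s))) (le_max_left _ _)
      labels.length (min ((labels.length : Int) - 1) (PySem.Int.floordiv (j : Int) s)) (by
        have := min_le_left ((labels.length : Int) - 1) (PySem.Int.floordiv (j : Int) s)
        omega))

-- ===== VERDICT (by name: the statement is the Claim_ definition above) =====
theorem overlap_final_label_spec : Claim_equal_overlap_final_label := by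
  intro labels w s X _ hpre
  unfold Pre_overlap_final_label at hpre
  unfold Spec_overlap_final_label overlap_final_label overlap_final_label_alt
  rw [outer_loop labels w s X.length hpre labels.length]
  apply List.map_congr_left
  intro j _
  exact (bPoint_eq labels w s hpre j).symm
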